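-- pv_equiv track=rewrite | github.com/trpaleho75/Python | jira_migration/migration/core.py | get_epic_link_dict
-- ===== SOURCE A (Python) =====
-- def get_columns(headers: list, field_Name: str) -> list:
-- 	"""
-- 	Search input data headers for exact matching string.
--
-- 	Args:
-- 		headers(list): headers of CSV dataset for searching.
-- 		search_string(str): Column name to search for.
--
-- 	Returns:
-- 		(lits): List of column indices.
-- 	"""
--
-- 	indices = []
-- 	column_index = 0
-- 	for header in headers:
-- 		if header == field_Name:
-- 			indices.append(column_index)
-- 		column_index += 1
-- 	return indices
--
-- def get_epic_link_dict(csv_data: list) -> dict: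
-- 	"""
-- 	Get {issue_key: Epic_name} for all epics.
--
-- 	Args:
--
-- 	Returns:
--
-- 	"""
--
-- 	headers = csv_data[0]
-- 	issue_key_columns = get_columns(headers, 'Issue Key')
-- 	epic_name_columns = get_columns(headers, 'Epic Name')
-- 	issue_key_epic_name_dict = {}
-- 	csv_rows = [row for row in csv_data if csv_data.index(row) != 0]
-- 	for row in csv_rows:
-- 		for col in epic_name_columns:
-- 			epic_name = row[col]
-- 			if epic_name:
-- 				for issue_key_column in issue_key_columns:
-- 					issue_key_epic_name_dict[row[issue_key_column]] = epic_name
-- 	return issue_key_epic_name_dict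
-- ===== SOURCE B (Python) =====
-- def get_epic_link_dict(csv_data: list) -> dict:
--     """Build {issue_key: epic_name}: per data row only the LAST truthy 'Epic Name'
--     cell can survive A's repeated overwrites, so find it with one reversed scan and
--     assign each issue key once, instead of re-assigning every key for every truthy
--     epic column."""
--     headers = csv_data[0]
--     key_cols = [i for i, h in enumerate(headers) if h == 'Issue Key']
--     epic_cols = [i for i, h in enumerate(headers) if h == 'Epic Name']
--     result = {}
--     for row in csv_data:
--         if row == headers:
--             continue
--         epic = next((row[c] for c in reversed(epic_cols) if row[c]), '')
--         if epic:
--             for k in key_cols: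
--                 result[row[k]] = epic
--     return result
-- ===== Notes on version B (the rewrite author's own statement) =====
-- stated objective: alternative
-- what changed: B exploits that within a row only the LAST truthy 'Epic Name' cell survives A's repeated dict overwrites: it finds that cell with one reversed early-exit scan and assigns each issue key exactly once per row, replacing A's nested loop that re-assigns every issue key for every truthy epic column (and dropping A's csv_data.index(row) scan in the row filter).
import Mathlib
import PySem

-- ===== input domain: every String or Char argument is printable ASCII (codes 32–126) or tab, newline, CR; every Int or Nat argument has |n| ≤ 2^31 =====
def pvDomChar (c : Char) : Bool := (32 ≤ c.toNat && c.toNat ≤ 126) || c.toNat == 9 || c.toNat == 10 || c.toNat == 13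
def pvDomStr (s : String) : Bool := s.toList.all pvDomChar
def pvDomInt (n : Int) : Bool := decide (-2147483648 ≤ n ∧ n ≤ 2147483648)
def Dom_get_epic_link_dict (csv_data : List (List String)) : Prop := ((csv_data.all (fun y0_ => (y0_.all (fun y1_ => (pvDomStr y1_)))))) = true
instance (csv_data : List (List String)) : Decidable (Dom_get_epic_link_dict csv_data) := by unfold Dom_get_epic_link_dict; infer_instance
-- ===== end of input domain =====

-- B replaces A's per-row nested overwrite loops (every truthy epic column re-assigns every issue key; plus an O(rows) csv_data.index(row) scan in the row filter) by one reversed scan for the row's last truthy epic cell and a single assignment pass; same return value on all inputs admitted by Pre_.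


-- ===== PORT A =====
-- get_columns: running column_index counter appending matching indices
def get_columns (headers : List String) (field_Name : String) : List Nat :=
  (headers.foldl
    (fun (st : List Nat × Nat) header =>
      (if header = field_Name then st.1 ++ [st.2] else st.1, st.2 + 1))
    ([], 0)).1

def get_epic_link_dict (csv_data : List (List String)) : List (String × String) :=
  let headers := (PySem.List.pyGet? csv_data 0).getD []   -- csv_data[0]; empty input excluded by Pre_
  let issue_key_columns := get_columns headers "Issue Key"
  let epic_name_columns := get_columns headers "Epic Name"
  let csv_rows := csv_data.filter (fun row => decide (PySem.List.index? csv_data row ≠ some 0))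
  (csv_rows.foldl
    (fun dict row =>
      epic_name_columns.foldl
        (fun dict (col : Nat) =>
          let epic_name := PySem.List.pyGetD row (col : Int) ""   -- row[col]; in range under Pre_
          if epic_name ≠ "" then
            issue_key_columns.foldl
              (fun dict (issue_key_column : Nat) =>
                dict.insert (PySem.List.pyGetD row (issue_key_column : Int) "") epic_name)
              dict
          else dict)
        dict)
    (PySem.Dict.empty : PySem.Dict String String)).items

-- ===== PORT B =====
def get_epic_link_dict_alt (csv_data : List (List String)) : List (String × String) :=
  let headers := csv_data.headD []   -- csv_data[0]; empty input excluded by Pre_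
  let key_cols := ((PySem.List.enumerate headers 0).filter (fun p => decide (p.2 = "Issue Key"))).map (·.1)
  let epic_cols := ((PySem.List.enumerate headers 0).filter (fun p => decide (p.2 = "Epic Name"))).map (·.1)
  (csv_data.foldl
    (fun dict row =>
      if row = headers then dict
      else
        -- next((row[c] for c in reversed(epic_cols) if row[c]), '')   -- row[c] in range under Pre_
        let epic := ((epic_cols.reverse.find? (fun c => decide (PySem.List.pyGetD row c "" ≠ ""))).map
          (fun c => PySem.List.pyGetD row c "")).getD ""
        if epic ≠ "" then
          key_cols.foldl (fun dict k => dict.insert (PySem.List.pyGetD row k "") epic) dict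
        else dict)
    (PySem.Dict.empty : PySem.Dict String String)).items

-- ===== PRECONDITION & SPEC =====
-- Pre_ excludes exactly the inputs where A raises IndexError: empty csv_data, and data rows too
-- short for an 'Epic Name' column A reads (or, when some epic cell of the row is truthy, for an
-- 'Issue Key' column A reads).
def Pre_get_epic_link_dict (csv_data : List (List String)) : Prop :=
  csv_data ≠ [] ∧
  ∀ r ∈ csv_data,
    (∀ i ∈ List.range (csv_data.headD []).length,
        (csv_data.headD []).getD i "" = "Epic Name" → i < r.length) ∧
    ((∃ i ∈ List.range (csv_data.headD []).length,
        (csv_data.headD []).getD i "" = "Epic Name" ∧ r.getD i "" ≠ "") →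
      ∀ i ∈ List.range (csv_data.headD []).length,
        (csv_data.headD []).getD i "" = "Issue Key" → i < r.length)
instance (csv_data : List (List String)) : Decidable (Pre_get_epic_link_dict csv_data) := by
  unfold Pre_get_epic_link_dict; infer_instance

def pvWitness_get_epic_link_dict : List (List String) :=
  [["Issue Key", "Epic Name"], ["K1", "E1"], ["K2", ""]]

def Spec_get_epic_link_dict (csv_data : List (List String)) (out : List (String × String)) : Prop :=
  out = get_epic_link_dict_alt csv_data
instance (csv_data : List (List String)) (out : List (String × String)) : Decidable (Spec_get_epic_link_dict csv_data out) := by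
  unfold Spec_get_epic_link_dict; infer_instance

-- ===== CLAIM (what is proved, stated in full; the proofs are below) =====
def Claim_equal_get_epic_link_dict : Prop := ∀ (csv_data : List (List String)), Dom_get_epic_link_dict csv_data → Pre_get_epic_link_dict csv_data → Spec_get_epic_link_dict csv_data (get_epic_link_dict csv_data)

-- ===== LEMMAS AND PROOFS =====
theorem enum_cols_eq (hs : List String) (f : String) :
    ((PySem.List.enumerate hs 0).filter (fun p => decide (p.2 = f))).map (·.1)
      = (((List.range hs.length).filter (fun i => hs.getD i "" = f)).map (fun (n : Nat) => (n : Int))) := by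
  rw [PySem.List.enumerate_eq_map_pyRange hs ""]
  rw [show PySem.List.len hs = ((hs.length : Int)) from by simp [pysem]]
  rw [PySem.List.pyRange_zero_natCast hs.length]
  simp [List.filter_map, List.map_map, Function.comp_def, List.getD]
  rfl

def pvUpd (K : List String) (e : String) (p : String × String) : String × String :=
  if p.1 ∈ K then (p.1, e) else p

def pvNews (K : List String) (seen : List String) : List String :=
  match K with
  | [] => []
  | k :: K => if k ∈ seen then pvNews K seen else k :: pvNews K (k :: seen)

theorem pvNews_congr (K : List String) :
    ∀ (s t : List String), (∀ x, x ∈ s ↔ x ∈ t) → pvNews K s = pvNews K t := by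
  induction K with
  | nil => intro s t _; rfl
  | cons k K ih =>
    intro s t hst
    simp only [pvNews]
    by_cases hk : k ∈ s
    · rw [if_pos hk, if_pos ((hst k).mp hk)]; exact ih s t hst
    · rw [if_neg hk, if_neg (fun h => hk ((hst k).mpr h))]
      exact congrArg (k :: ·) (ih _ _ (fun x => by simp [hst x]))

theorem mem_of_mem_pvNews (K : List String) :
    ∀ (s : List String) (x : String), x ∈ pvNews K s → x ∈ K := by
  induction K with
  | nil => intro s x h; simp [pvNews] at h
  | cons k K ih =>
    intro s x h
    simp only [pvNews] at h
    by_cases hk : k ∈ s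
    · rw [if_pos hk] at h; exact List.mem_cons_of_mem _ (ih _ _ h)
    · rw [if_neg hk] at h
      rcases List.mem_cons.mp h with h | h
      · simp [h]
      · exact List.mem_cons_of_mem _ (ih _ _ h)

theorem pvNews_nil (K : List String) :
    ∀ (s : List String), (∀ k ∈ K, k ∈ s) → pvNews K s = [] := by
  induction K with
  | nil => intro s _; rfl
  | cons k K ih =>
    intro s hs
    simp only [pvNews, if_pos (hs k (by simp))]
    exact ih s (fun x hx => hs x (by simp [hx]))

theorem mem_pvNews (K : List String) :
    ∀ (s : List String) (k : String), k ∈ K → k ∉ s → k ∈ pvNews K s := by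
  induction K with
  | nil => intro s k h; simp at h
  | cons k' K ih =>
    intro s k hk hks
    simp only [pvNews]
    by_cases hk' : k' ∈ s
    · rw [if_pos hk']
      rcases List.mem_cons.mp hk with rfl | hk
      · exact absurd hk' hks
      · exact ih s k hk hks
    · rw [if_neg hk']
      rcases List.mem_cons.mp hk with rfl | hk
      · simp
      · by_cases hkk : k = k'
        · simp [hkk]
        · exact List.mem_cons_of_mem _ (ih (k' :: s) k hk (by simp [hkk, hks]))

theorem pvItems_insAll (e : String) (K : List String) :
    ∀ (d : PySem.Dict String String),
      (K.foldl (fun d k => d.insert k e) d).items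
        = d.items.map (pvUpd K e) ++ (pvNews K d.keys).map (fun k => (k, e)) := by
  induction K with
  | nil =>
    intro d
    rw [show pvUpd [] e = id from funext fun p => by simp [pvUpd]]
    simp [pvNews]
  | cons k K ih =>
    intro d
    simp only [List.foldl_cons]
    rw [ih (d.insert k e)]
    by_cases hc : d.contains k = true
    · have hkmem : k ∈ d.keys := (PySem.Dict.contains_iff_mem_keys d k).mp hc
      rw [PySem.Dict.items_insert_of_contains d e hc,
        PySem.Dict.keys_insert_of_contains d e hc, List.map_map]
      have hnews : pvNews (k :: K) d.keys = pvNews K d.keys := by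
        simp only [pvNews, if_pos hkmem]
      rw [hnews]
      congr 1
      apply List.map_congr_left
      intro p _
      by_cases hpk : p.1 = k
      · simp [pvUpd, hpk]
      · simp [pvUpd, hpk]
    · have hc' : d.contains k = false := by simpa using hc
      have hkmem : k ∉ d.keys := fun h => hc ((PySem.Dict.contains_iff_mem_keys d k).mpr h)
      rw [PySem.Dict.items_insert_of_not_contains d e hc',
        PySem.Dict.keys_insert_of_not_contains d e hc', List.map_append]
      have hupd : pvUpd K e (k, e) = (k, e) := by unfold pvUpd; split <;> rfl
      have hnews2 : pvNews (k :: K) d.keys = k :: pvNews K (k :: d.keys) := by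
        simp only [pvNews, if_neg hkmem]
      have hnews3 : pvNews K (d.keys ++ [k]) = pvNews K (k :: d.keys) :=
        pvNews_congr K _ _ (fun x => by simp [or_comm])
      rw [hnews2, hnews3,
        show (List.map (pvUpd K e) [(k, e)]) = [(k, e)] from by simp [hupd],
        show d.items.map (pvUpd K e) = d.items.map (pvUpd (k :: K) e) from by
          apply List.map_congr_left
          intro p hp
          have hpk : p.1 ≠ k := fun h => hkmem (h ▸ List.mem_map_of_mem hp)
          simp [pvUpd, hpk]]
      simp

theorem pvKeys_insAll (e : String) (K : List String) (d : PySem.Dict String String) :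
    (K.foldl (fun d k => d.insert k e) d).keys = d.keys ++ pvNews K d.keys := by
  have h := pvItems_insAll e K d
  have : (K.foldl (fun d k => d.insert k e) d).keys
      = ((K.foldl (fun d k => d.insert k e) d).items).map (·.1) := by
    simp [PySem.Dict.keys]
  rw [this, h, List.map_append, List.map_map, List.map_map]
  congr 1
  · rw [show d.keys = d.items.map (·.1) from by simp [PySem.Dict.keys]]
    apply List.map_congr_left
    intro p _
    by_cases hp : p.1 ∈ K <;> simp [pvUpd, hp]
  · simp [Function.comp_def]

theorem insAll_insAll (K : List String) (e1 e2 : String) (d : PySem.Dict String String) :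
    K.foldl (fun d k => d.insert k e2) (K.foldl (fun d k => d.insert k e1) d)
      = K.foldl (fun d k => d.insert k e2) d := by
  apply PySem.Dict.ext
  rw [pvItems_insAll, pvItems_insAll, pvItems_insAll, pvKeys_insAll]
  have hnil : pvNews K (d.keys ++ pvNews K d.keys) = [] := by
    apply pvNews_nil
    intro k hk
    by_cases hkd : k ∈ d.keys
    · simp [hkd]
    · simp [mem_pvNews K d.keys k hk hkd]
  rw [hnil, List.map_append, List.map_map, List.map_map]
  have h1 : d.items.map (pvUpd K e2 ∘ pvUpd K e1) = d.items.map (pvUpd K e2) := by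
    apply List.map_congr_left
    intro p _
    by_cases hp : p.1 ∈ K <;> simp [pvUpd, hp]
  have h2 : (pvNews K d.keys).map (pvUpd K e2 ∘ fun k => (k, e1))
      = (pvNews K d.keys).map (fun k => (k, e2)) := by
    apply List.map_congr_left
    intro k hk
    have : k ∈ K := mem_of_mem_pvNews K d.keys k hk
    simp [pvUpd, this]
  rw [h1, h2]
  simp

theorem foldl_last (K : List String) :
    ∀ (E : List String) (d : PySem.Dict String String),
      E.foldl
        (fun d e =>
          if e ≠ "" then K.foldl (fun d k => d.insert k e) d else d) d
      = match E.reverse.find? (fun e => decide (e ≠ "")) with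
        | some e => K.foldl (fun d k => d.insert k e) d
        | none => d := by
  intro E
  induction E using List.reverseRecOn with
  | nil => intro d; rfl
  | append_singleton E x ih =>
    intro d
    rw [List.foldl_append, List.reverse_append, List.reverse_singleton, List.singleton_append]
    by_cases hx : x = ""
    · simp only [List.foldl_cons, List.foldl_nil, hx]
      rw [List.find?_cons_of_neg (by simp)]
      simpa using ih d
    · rw [List.find?_cons_of_pos (by simpa using hx)]
      simp only [List.foldl_cons, List.foldl_nil, if_pos hx]
      rw [ih d]
      cases hf : E.reverse.find? (fun e => decide (e ≠ "")) with
      | none => rfl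
      | some e => exact insAll_insAll K e x d

theorem gc_go (f : String) :
    ∀ (hs : List String) (acc : List Nat) (n : Nat),
      (hs.foldl
        (fun (st : List Nat × Nat) header =>
          (if header = f then st.1 ++ [st.2] else st.1, st.2 + 1)) (acc, n)).1
      = acc ++ ((List.range hs.length).filter (fun i => hs.getD i "" = f)).map (· + n) := by
  intro hs
  induction hs with
  | nil => intro acc n; simp
  | cons h t ih =>
    intro acc n
    simp only [List.foldl_cons, ih, List.length_cons, List.range_succ_eq_map,
      List.filter_cons, List.filter_map]
    by_cases hf : h = f <;>
      simp [hf, Function.comp_def, Nat.add_assoc, Nat.add_comm 1 n] <;> rfl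

theorem get_columns_eq (headers : List String) (f : String) :
    get_columns headers f
      = (List.range headers.length).filter (fun i => headers.getD i "" = f) := by
  simpa using gc_go f headers [] 0

theorem fold_by_cols (cols kcols : List Nat) (r : List String)
    (d : PySem.Dict String String) :
    cols.foldl
      (fun dict (col : Nat) =>
        let epic_name := PySem.List.pyGetD r (col : Int) ""
        if epic_name ≠ "" then
          kcols.foldl
            (fun dict (k : Nat) => dict.insert (PySem.List.pyGetD r (k : Int) "") epic_name) dict
        else dict)
      d
    = (cols.map (fun c => r.getD c "")).foldl
        (fun dict e =>
          if e ≠ "" then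
            (kcols.map (fun k => r.getD k "")).foldl
              (fun dict key => dict.insert key e) dict
          else dict)
        d := by
  simp only [List.foldl_map, PySem.List.pyGetD_natCast]

theorem int_find_fold (cols kcols : List Nat) (r : List String) (d : PySem.Dict String String) :
    (let epic := (((cols.map (fun (n : Nat) => (n : Int))).reverse.find?
          (fun c => decide (PySem.List.pyGetD r c "" ≠ ""))).map
          (fun c => PySem.List.pyGetD r c "")).getD ""
     if epic ≠ "" then
       (kcols.map (fun (n : Nat) => (n : Int))).foldl
         (fun d k => d.insert (PySem.List.pyGetD r k "") epic) d
     else d)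
    = (let epicN := ((cols.reverse.find? (fun c => decide (r.getD c "" ≠ ""))).map
          (fun c => r.getD c "")).getD ""
       if epicN ≠ "" then
         kcols.foldl (fun d k => d.insert (r.getD k "") epicN) d
       else d) := by
  rw [← List.map_reverse, List.find?_map]
  simp only [Function.comp_def, PySem.List.pyGetD_natCast, Option.map_map, List.foldl_map]

theorem match_find_map (cols kcols : List Nat) (r : List String) (d : PySem.Dict String String) :
    (match ((cols.map (fun c => r.getD c "")).reverse.find? (fun e => decide (e ≠ ""))) with
     | some e => (kcols.map (fun k => r.getD k "")).foldl (fun d k => d.insert k e) d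
     | none => d)
    = (let epicN := ((cols.reverse.find? (fun c => decide (r.getD c "" ≠ ""))).map
          (fun c => r.getD c "")).getD ""
       if epicN ≠ "" then
         kcols.foldl (fun d k => d.insert (r.getD k "") epicN) d
       else d) := by
  rw [← List.map_reverse, List.find?_map]
  simp only [Function.comp_def, List.foldl_map]
  cases hf : cols.reverse.find? (fun c => decide (r.getD c "" ≠ "")) with
  | none => simp
  | some c =>
    have pc : r[c]?.getD "" ≠ "" := by
      simpa [List.getD] using List.find?_some hf
    simp [pc]

theorem row_step_eq (hs r : List String) (d : PySem.Dict String String) :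
    (get_columns hs "Epic Name").foldl
      (fun d (col : Nat) =>
        let epic_name := PySem.List.pyGetD r (col : Int) ""
        if epic_name ≠ "" then
          (get_columns hs "Issue Key").foldl
            (fun d (issue_key_column : Nat) =>
              d.insert (PySem.List.pyGetD r (issue_key_column : Int) "") epic_name)
            d
        else d)
      d
    = (let epic := ((((((PySem.List.enumerate hs 0).filter (fun p => decide (p.2 = "Epic Name"))).map (·.1)).reverse.find?
          (fun c => decide (PySem.List.pyGetD r c "" ≠ ""))).map
          (fun c => PySem.List.pyGetD r c "")).getD "")
       if epic ≠ "" then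
         (((PySem.List.enumerate hs 0).filter (fun p => decide (p.2 = "Issue Key"))).map (·.1)).foldl
           (fun d k => d.insert (PySem.List.pyGetD r k "") epic) d
       else d) := by
  rw [get_columns_eq hs "Epic Name", get_columns_eq hs "Issue Key",
    fold_by_cols, foldl_last, match_find_map,
    enum_cols_eq hs "Epic Name", enum_cols_eq hs "Issue Key", int_find_fold]

-- skipping rows equal to h in a fold = folding over the rows ≠ h
theorem foldl_skip {α β : Type} [DecidableEq α] (h : α) (f : β → α → β) :
    ∀ (l : List α) (d : β),
      l.foldl (fun d x => if x = h then d else f d x) d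
        = (l.filter (fun x => decide (x ≠ h))).foldl f d := by
  intro l
  induction l with
  | nil => intro d; rfl
  | cons x t ih =>
    intro d
    by_cases hx : x = h <;> simp [hx, ih]

-- A's row filter keeps exactly the rows different from the header row
theorem rows_filter_eq (h : List String) (t : List (List String)) :
    (h :: t).filter
        (fun row => decide (PySem.List.index? (h :: t) row ≠ some 0))
      = (h :: t).filter (fun row => decide (row ≠ h)) := by
  apply List.filter_congr
  intro row _
  by_cases hr : row = h
  · subst hr
    rw [PySem.List.index?_cons_self]
    simp
  · rw [PySem.List.index?_cons_of_ne t (Ne.symm hr)]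
    simp only [hr, decide_not]
    cases PySem.List.index? t row <;> simp

-- both folds over the same rows with pointwise-equal steps agree
theorem foldl_congr_rows {α β : Type} (f g : β → α → β) :
    ∀ (l : List α) (d : β), (∀ x ∈ l, ∀ b, f b x = g b x) →
      l.foldl f d = l.foldl g d := by
  intro l
  induction l with
  | nil => intro d _; rfl
  | cons x t ih =>
    intro d hfg
    simp only [List.foldl_cons, hfg x (by simp) d]
    exact ih _ (fun y hy b => hfg y (by simp [hy]) b)

-- ===== VERDICT (by name: the statement is the Claim_ definition above) =====
theorem get_epic_link_dict_spec : Claim_equal_get_epic_link_dict := by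
  intro csv_data _ hpre
  obtain ⟨hne, -⟩ := hpre
  cases csv_data with
  | nil => exact absurd rfl hne
  | cons h t => ?_
  show get_epic_link_dict (h :: t) = get_epic_link_dict_alt (h :: t)
  unfold get_epic_link_dict get_epic_link_dict_alt
  simp only [List.headD_cons]
  have hhead : (PySem.List.pyGet? (h :: t) 0).getD [] = h := by
    simp [PySem.List.pyGet?, PySem.List.pyIdx?]
  rw [hhead, rows_filter_eq h t, foldl_skip h _ (h :: t) PySem.Dict.empty]
  congr 1
  apply foldl_congr_rows
  intro row _ d
  exact row_step_eq h row d
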